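-- pv_equiv track=rewrite | github.com/barsuk4/IT-Brain | !!!.py | find_consecutive_primes
-- ===== SOURCE A (Python) =====
-- def is_prime(n):
--     if n <= 1:
--         return False
--     if n <= 3:
--         return True
--     if n % 2 == 0 or n % 3 == 0:
--         return False
--     i = 5
--     while i * i <= n:
--         if n % i == 0 or n % (i + 2) == 0:
--             return False
--         i += 6
--     return True
--
-- def find_consecutive_primes(start, end):
--     max_consecutive = 0
--     current_consecutive = 0
--     for num in range(start, end + 1):
--         if is_prime(num):
--             current_consecutive += 1
--             if current_consecutive > max_consecutive:
--                 max_consecutive = current_consecutive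
--         else:
--             current_consecutive = 0
--     return max_consecutive
-- ===== SOURCE B (Python) =====
-- def _is_prime(n):
--     if n <= 1:
--         return False
--     if n <= 3:
--         return True
--     if n % 2 == 0 or n % 3 == 0:
--         return False
--     i = 5
--     while i * i <= n:
--         if n % i == 0 or n % (i + 2) == 0:
--             return False
--         i += 6
--     return True
--
-- def find_consecutive_primes(start, end):
--     # Only 2 and 3 are consecutive primes, so the longest run is 2, 1 or 0.
--     if start <= 2 and end >= 3:
--         return 2
--     for n in range(max(start, 2), end + 1):
--         if _is_prime(n):
--             return 1
--     return 0
-- ===== Notes on version B (the rewrite author's own statement) =====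
-- stated objective: alternative
-- what changed: Replaces A's full counting scan (max/current-run counters over the whole range) by the observation that only one pair of adjacent integers can both be prime: B answers 2 directly when the range covers that pair, otherwise does an early-exit scan that stops at the first prime and returns 1, else 0.
import Mathlib
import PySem

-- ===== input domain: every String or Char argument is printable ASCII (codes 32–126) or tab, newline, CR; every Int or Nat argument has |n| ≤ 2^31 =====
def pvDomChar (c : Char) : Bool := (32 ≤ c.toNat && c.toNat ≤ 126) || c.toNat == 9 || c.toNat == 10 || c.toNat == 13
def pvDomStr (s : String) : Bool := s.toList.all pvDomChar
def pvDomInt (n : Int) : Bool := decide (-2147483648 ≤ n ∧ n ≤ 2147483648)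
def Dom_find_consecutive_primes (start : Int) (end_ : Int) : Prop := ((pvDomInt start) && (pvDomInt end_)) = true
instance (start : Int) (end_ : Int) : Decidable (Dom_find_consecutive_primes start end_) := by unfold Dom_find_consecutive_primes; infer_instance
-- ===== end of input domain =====

-- B replaces A's full counting scan by the fact that only (2,3) are consecutive primes:
-- answer 2 iff the range covers 2 and 3, else 1 iff the range contains a prime (early-exit scan), else 0.

-- ===== PORT A =====
def is_prime_loop (n : Int) (i : Int) : Bool :=
  if h : i * i ≤ n then
    if PySem.Int.mod n i = 0 || PySem.Int.mod n (i + 2) = 0 then false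
    else is_prime_loop n (i + 6)
  else true
termination_by (n + 1 - i).toNat
decreasing_by
  rcases le_or_gt i 0 with h0 | h0
  · have := mul_self_nonneg i; omega
  · have h1 : i ≤ i * i := by nlinarith
    omega

def is_prime (n : Int) : Bool :=
  if n ≤ 1 then false
  else if n ≤ 3 then true
  else if PySem.Int.mod n 2 = 0 || PySem.Int.mod n 3 = 0 then false
  else is_prime_loop n 5

def find_consecutive_primes (start : Int) (end_ : Int) : Int :=
  ((PySem.List.pyRange start (end_ + 1) 1).foldl
    (fun (s : Int × Int) num =>
      if is_prime num then
        let c := s.2 + 1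
        (if c > s.1 then c else s.1, c)
      else (s.1, 0))
    (0, 0)).1

-- ===== PORT B =====
def alt_scan (end_ : Int) (n : Int) : Int :=
  if h : end_ < n then 0
  else if is_prime n then 1
  else alt_scan end_ (n + 1)
termination_by (end_ + 1 - n).toNat
decreasing_by omega

def find_consecutive_primes_alt (start : Int) (end_ : Int) : Int :=
  if start ≤ 2 ∧ 3 ≤ end_ then 2
  else alt_scan end_ (max start 2)

-- ===== PRECONDITION & SPEC =====
def Spec_find_consecutive_primes (start : Int) (end_ : Int) (out : Int) : Prop := out = find_consecutive_primes_alt start end_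
instance (start : Int) (end_ : Int) (out : Int) : Decidable (Spec_find_consecutive_primes start end_ out) := by unfold Spec_find_consecutive_primes; infer_instance

-- ===== CLAIM (what is proved, stated in full; the proofs are below) =====
def Claim_equal_find_consecutive_primes : Prop := ∀ (start : Int) (end_ : Int), Dom_find_consecutive_primes start end_ → Spec_find_consecutive_primes start end_ (find_consecutive_primes start end_)

-- ===== LEMMAS AND PROOFS =====

-- the "best run" value A's fold maintains, over the n consecutive integers starting at a,
-- with c primes run in immediately before a
def Gfun : Int → Int → Nat → Int
  | _, _, 0 => 0
  | c, a, n+1 => if is_prime a then max (c+1) (Gfun (c+1) (a+1) n) else Gfun 0 (a+1) n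

lemma prime_low {n : Int} (h : n ≤ 1) : is_prime n = false := by
  simp [is_prime, h]

lemma prime_even {n : Int} (h3 : 3 < n) (h2 : n % 2 = 0) : is_prime n = false := by
  simp only [is_prime, if_neg (show ¬ n ≤ 1 by omega), if_neg (show ¬ n ≤ 3 by omega)]
  rw [if_pos]
  rw [PySem.Int.mod_eq_emod_of_pos (show (0:Int) < 2 by norm_num), h2]
  simp

lemma consec {n : Int} (h1 : is_prime n = true) (h2 : is_prime (n + 1) = true) : n = 2 := by
  rcases le_or_gt n 1 with h | h
  · rw [prime_low h] at h1; cases h1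
  · rcases le_or_gt n 3 with h3 | h3
    · have : n = 2 ∨ n = 3 := by omega
      rcases this with rfl | rfl
      · rfl
      · have h4 : is_prime 4 = false := by decide
        norm_num [h4] at h2
    · have hk := Int.emod_two_eq n
      rcases hk with hk | hk
      · rw [prime_even h3 hk] at h1; cases h1
      · have hnext : (n + 1) % 2 = 0 := by omega
        rw [prime_even (by omega) hnext] at h2; cases h2

lemma noconsec {n : Int} (h1 : is_prime n = true) (h3 : 3 ≤ n) : is_prime (n + 1) = false := by
  by_contra h
  have h' : is_prime (n + 1) = true := by
    cases hx : is_prime (n + 1) <;> simp [hx] at h ⊢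
  have := consec h1 h'
  omega

lemma scan_nil {e n : Int} (h : e < n) : alt_scan e n = 0 := by
  rw [alt_scan]; simp [h]

lemma scan_prime {e n : Int} (h : ¬ e < n) (hp : is_prime n = true) : alt_scan e n = 1 := by
  rw [alt_scan]; simp [h, hp]

lemma scan_step {e n : Int} (h : ¬ e < n) (hp : is_prime n = false) : alt_scan e n = alt_scan e (n + 1) := by
  rw [alt_scan]; simp [h, hp]

lemma scan01 (e n : Int) : alt_scan e n = 0 ∨ alt_scan e n = 1 := by
  rw [alt_scan]
  split
  · left; rfl
  · split
    · right; rfl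
    · exact scan01 e (n + 1)
termination_by (e + 1 - n).toNat
decreasing_by omega

lemma fold_eq (n : Nat) : ∀ a m c : Int, 0 ≤ m →
    ((PySem.List.pyRange a (a + (n : Int)) 1).foldl
      (fun (s : Int × Int) num =>
        if is_prime num then
          let c := s.2 + 1
          (if c > s.1 then c else s.1, c)
        else (s.1, 0)) (m, c)).1 = max m (Gfun c a n) := by
  induction n with
  | zero =>
    intro a m c hm
    rw [show a + ((0 : Nat) : Int) = a by simp, PySem.List.pyRange_one_eq_nil le_rfl]
    simp [Gfun]
    omega
  | succ k ih =>
    intro a m c hm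
    have hb : a + ((k + 1 : Nat) : Int) = (a + 1) + (k : Int) := by push_cast; ring
    rw [hb, PySem.List.pyRange_one_cons (by omega)]
    simp only [List.foldl_cons]
    by_cases hp : is_prime a
    · simp only [hp, if_true]
      have hmax : (if c + 1 > m then c + 1 else m) = max m (c + 1) := by omega
      rw [hmax, ih (a + 1) (max m (c + 1)) (c + 1) (by omega)]
      simp only [Gfun, hp, if_true]
      omega
    · simp only [hp, if_false, Bool.false_eq_true]
      rw [ih (a + 1) m 0 hm]
      simp only [Gfun, hp, if_false, Bool.false_eq_true]

lemma Gge3 (n : Nat) : ∀ a : Int, 3 ≤ a → Gfun 0 a n = alt_scan (a + (n : Int) - 1) a := by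
  induction n using Nat.strong_induction_on with
  | _ n ih =>
    intro a ha
    match n with
    | 0 =>
      rw [show Gfun 0 a 0 = 0 from rfl]
      rw [scan_nil (by push_cast; omega)]
    | Nat.succ k =>
      by_cases hp : is_prime a
      · have hG1 : Gfun 1 (a + 1) k = 0 ∨ Gfun 1 (a + 1) k = 1 := by
          match k with
          | 0 => left; rfl
          | Nat.succ j =>
            have hnp : is_prime (a + 1) = false := noconsec hp ha
            have : Gfun 1 (a + 1) (j + 1) = Gfun 0 (a + 2) j := by
              simp only [Gfun, hnp, if_false, Bool.false_eq_true]
              rw [show a + 1 + 1 = a + 2 by ring]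
            rw [this, ih j (by omega) (a + 2) (by omega)]
            exact scan01 _ _
      -- LHS
        have hL : Gfun 0 a (k + 1) = max 1 (Gfun 1 (a + 1) k) := by
          simp only [Gfun, hp, if_true]
          norm_num
        rw [hL, scan_prime (by push_cast; omega) hp]
        omega
      · have hL : Gfun 0 a (k + 1) = Gfun 0 (a + 1) k := by
          simp only [Gfun, hp, if_false, Bool.false_eq_true]
        rw [hL, ih k (by omega) (a + 1) (by omega),
            scan_step (show ¬ a + ((k + 1 : Nat) : Int) - 1 < a by push_cast; omega)
              (by cases hx : is_prime a; rfl; exact absurd hx hp)]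
        congr 1
        push_cast; ring

lemma Gskip : ∀ j : Nat, ∀ (a : Int) (n : Nat), a = 2 - (j : Int) → Gfun 0 a n = Gfun 0 2 (n - j) := by
  intro j
  induction j with
  | zero => intro a n h; simp at h; subst h; rfl
  | succ i ih =>
    intro a n h
    match n with
    | 0 => rw [Nat.zero_sub]; rfl
    | Nat.succ m =>
      have hlow : is_prime a = false := prime_low (by omega)
      have : Gfun 0 a (m + 1) = Gfun 0 (a + 1) m := by
        simp only [Gfun, hlow, if_false, Bool.false_eq_true]
      rw [this, ih (a + 1) m (by push_cast at h ⊢; omega)]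
      congr 1
      omega

lemma G_at_2 (n : Nat) (hn : 2 ≤ n) : Gfun 0 2 n = 2 := by
  obtain ⟨k, rfl⟩ : ∃ k, n = k + 2 := ⟨n - 2, by omega⟩
  have h2 : is_prime 2 = true := by decide
  have h3 : is_prime 3 = true := by decide
  have h4 : is_prime 4 = false := by decide
  have hG2 : Gfun 2 4 k = 0 ∨ Gfun 2 4 k = 1 := by
    match k with
    | 0 => left; rfl
    | Nat.succ j =>
      have : Gfun 2 4 (j + 1) = Gfun 0 5 j := by
        simp only [Gfun, h4, if_false, Bool.false_eq_true]
        norm_num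
      rw [this, Gge3 j 5 (by omega)]
      exact scan01 _ _
  have e1 : Gfun 0 2 (k + 2) = max 1 (Gfun 1 3 (k + 1)) := by
    simp only [Gfun, h2, if_true]; norm_num
  have e2 : Gfun 1 3 (k + 1) = max 2 (Gfun 2 4 k) := by
    simp only [Gfun, h3, if_true]; norm_num
  rw [e1, e2]
  omega

lemma main_eq (s e : Int) : find_consecutive_primes s e = find_consecutive_primes_alt s e := by
  unfold find_consecutive_primes find_consecutive_primes_alt
  by_cases hse : s ≤ e + 1
  · set n : Nat := (e + 1 - s).toNat with hn
    have hb : e + 1 = s + (n : Int) := by omega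
    rw [hb, fold_eq n s 0 0 le_rfl]
    by_cases h2 : s ≤ 2
    · have hs : s = 2 - ((2 - s).toNat : Int) := by omega
      rw [Gskip (2 - s).toNat s n hs]
      by_cases h3 : 3 ≤ e
      · have hlen : 2 ≤ n - (2 - s).toNat := by omega
        rw [G_at_2 _ hlen]
        rw [if_pos ⟨h2, h3⟩]
        omega
      · rw [if_neg (by omega)]
        have hmax : max s 2 = 2 := by omega
        rw [hmax]
        rcases le_or_gt e 1 with he1 | he1
        · have hz : n - (2 - s).toNat = 0 := by omega
          rw [hz, show Gfun 0 2 0 = 0 from rfl, scan_nil (by omega)]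
          omega
        · have he2 : e = 2 := by omega
          have ho : n - (2 - s).toNat = 1 := by omega
          rw [ho, show Gfun 0 2 1 = 1 by decide, he2,
              scan_prime (by omega) (by decide)]
          omega
    · rw [if_neg (by omega)]
      have hmax : max s 2 = s := by omega
      rw [hmax, Gge3 n s (by omega)]
      have harg : s + (n : Int) - 1 = e := by omega
      rw [harg]
      rcases scan01 e s with h | h <;> omega
  · rw [PySem.List.pyRange_one_eq_nil (by omega)]
    rw [if_neg (by omega)]
    rw [scan_nil (by omega)]
    rfl

-- ===== VERDICT (by name: the statement is the Claim_ definition above) =====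
theorem find_consecutive_primes_spec : Claim_equal_find_consecutive_primes := by
  intro s e _
  unfold Spec_find_consecutive_primes
  exact main_eq s e
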